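-- pv_equiv track=rewrite | github.com/ElkinAaron/Parser | Parser.py | GramParser
-- ===== SOURCE A (Python) =====
-- def GramParser(itemlist, Hash, Hashnumber):
--     x = 0
--     while x < len(itemlist):
--         #Adds the trigrams from the tweet into the Hash
--         if x+2 < len(itemlist):
--             gram = itemlist[x]+" "+itemlist[x+1]+" "+itemlist[x+2]
--             Bool1= gram in Hash
--             if Bool1 == False:
--                 Hash[gram] = Hashnumber
--                 Hashnumber=Hashnumber+1
--         #Adds the bigrams from the tweet into the Hash
--         if x+1 < len(itemlist):
--             gram = itemlist[x]+" "+itemlist[x+1]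
--             Bool2 = gram in Hash
--             if Bool2 == False:
--                 Hash[gram] = Hashnumber
--                 Hashnumber=Hashnumber+1
--         gram = itemlist[x]
--         Bool3 = gram in Hash
--         #Adds the unigrams from the tweet into the Hash
--         if Bool3 == False:
--             Hash[gram] = Hashnumber
--             Hashnumber=Hashnumber+1
--         x=x+1
--     return Hash, Hashnumber
-- ===== SOURCE B (Python) =====
-- def GramParser(itemlist, Hash, Hashnumber):
--     # Stage 1: enumerate candidate n-grams by join over slices (tri, bi, uni per start).
--     n = len(itemlist)
--     grams = [" ".join(itemlist[x:x + k]) for x in range(n) for k in (3, 2, 1) if x + k <= n]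
--     # Stage 2: select the novel grams against the frozen key set, deduplicating with a seen-set.
--     seen = set(Hash)
--     novel = []
--     for g in grams:
--         if g not in seen:
--             seen.add(g)
--             novel.append(g)
--     # Stage 3: ids are arithmetic — the j-th novel gram gets Hashnumber + j.
--     for j, g in enumerate(novel):
--         Hash[g] = Hashnumber + j
--     return Hash, Hashnumber + len(novel)
-- ===== Notes on version B (the rewrite author's own statement) =====
-- stated objective: alternative
-- what changed: Replaced A's single while-loop that interleaves membership tests on the mutating dict with an incrementing id counter by three stages: enumerate candidate n-grams via ' '.join over slices, select the novel ones against the frozen key set using a separate seen-set, and assign ids arithmetically (Hashnumber + position) in a final batch write.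
import Mathlib
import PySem

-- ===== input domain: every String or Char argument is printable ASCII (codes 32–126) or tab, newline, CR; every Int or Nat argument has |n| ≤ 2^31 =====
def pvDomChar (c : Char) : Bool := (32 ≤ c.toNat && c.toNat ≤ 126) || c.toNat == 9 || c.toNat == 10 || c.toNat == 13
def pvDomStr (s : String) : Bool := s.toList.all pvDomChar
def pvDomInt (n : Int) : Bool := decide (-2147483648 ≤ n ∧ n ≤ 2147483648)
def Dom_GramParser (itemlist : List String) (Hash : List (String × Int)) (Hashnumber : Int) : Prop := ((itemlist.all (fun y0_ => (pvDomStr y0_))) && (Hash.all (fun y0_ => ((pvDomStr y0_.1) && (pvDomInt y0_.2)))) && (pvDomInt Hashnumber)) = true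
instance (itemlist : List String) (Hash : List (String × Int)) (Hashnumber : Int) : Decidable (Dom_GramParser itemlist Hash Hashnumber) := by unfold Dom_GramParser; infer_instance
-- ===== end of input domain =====

-- B is a three-stage rewrite (enumerate grams by slice+join, select novel ones against the frozen
-- key set with a seen-set, assign ids arithmetically); both Pythons mutate Hash in place the same
-- way, the proved equivalence is about the return value.

-- ===== PORT A =====
-- A's while loop: x counts up; per position the trigram, then the bigram, then the unigram
-- is added to the dict with the next id if not yet present.
def GramParserLoop (itemlist : List String) (x : Nat) (Hash : PySem.Dict String Int) (Hashnumber : Int) : PySem.Dict String Int × Int :=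
  if _h : x < itemlist.length then
    let st1 :=
      if x + 2 < itemlist.length then
        let gram := itemlist.getD x "" ++ " " ++ itemlist.getD (x+1) "" ++ " " ++ itemlist.getD (x+2) ""
        if (Hash.contains gram) = false then (Hash.insert gram Hashnumber, Hashnumber + 1) else (Hash, Hashnumber)
      else (Hash, Hashnumber)
    let st2 :=
      if x + 1 < itemlist.length then
        let gram := itemlist.getD x "" ++ " " ++ itemlist.getD (x+1) ""
        if (st1.1.contains gram) = false then (st1.1.insert gram st1.2, st1.2 + 1) else st1
      else st1
    let gram := itemlist.getD x ""
    let st3 := if (st2.1.contains gram) = false then (st2.1.insert gram st2.2, st2.2 + 1) else st2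
    GramParserLoop itemlist (x + 1) st3.1 st3.2
  else (Hash, Hashnumber)
termination_by itemlist.length - x

def GramParser (itemlist : List String) (Hash : List (String × Int)) (Hashnumber : Int) : (List (String × Int)) × Int :=
  let r := GramParserLoop itemlist 0 (PySem.Dict.mk Hash) Hashnumber
  (r.1.items, r.2)

-- ===== PORT B =====
-- Stage 1: the candidate n-grams, " ".join(itemlist[x:x+k]) for k in (3,2,1) when they fit.
def GramParser_altGrams (itemlist : List String) : List String :=
  (List.range itemlist.length).flatMap (fun x =>
    [3, 2, 1].flatMap (fun k =>
      if x + k ≤ itemlist.length then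
        [PySem.Str.join " " (PySem.List.slice itemlist (some (x : Int)) (some ((x : Int) + (k : Int))))]
      else []))

-- Stage 2 step: keep a gram not seen yet (seen starts as the frozen key set of Hash).
def GramParser_altSelect (st : PySem.Set String × List String) (g : String) : PySem.Set String × List String :=
  if st.1.contains g then st else (PySem.Set.add st.1 g, st.2 ++ [g])

def GramParser_alt (itemlist : List String) (Hash : List (String × Int)) (Hashnumber : Int) : (List (String × Int)) × Int :=
  let d0 := PySem.Dict.mk Hash
  let novel := ((GramParser_altGrams itemlist).foldl GramParser_altSelect (PySem.Set.ofList d0.keys, [])).2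
  -- Stage 3: the j-th novel gram gets id Hashnumber + j.
  let d := (PySem.List.enumerate novel).foldl (fun d p => d.insert p.2 (Hashnumber + p.1)) d0
  (d.items, Hashnumber + novel.length)

-- ===== PRECONDITION & SPEC =====
def Spec_GramParser (itemlist : List String) (Hash : List (String × Int)) (Hashnumber : Int) (out : (List (String × Int)) × Int) : Prop := out = GramParser_alt itemlist Hash Hashnumber
instance (itemlist : List String) (Hash : List (String × Int)) (Hashnumber : Int) (out : (List (String × Int)) × Int) : Decidable (Spec_GramParser itemlist Hash Hashnumber out) := by unfold Spec_GramParser; infer_instance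

-- ===== CLAIM (what is proved, stated in full; the proofs are below) =====
def Claim_equal_GramParser : Prop := ∀ (itemlist : List String) (Hash : List (String × Int)) (Hashnumber : Int), Dom_GramParser itemlist Hash Hashnumber → Spec_GramParser itemlist Hash Hashnumber (GramParser itemlist Hash Hashnumber)

-- ===== LEMMAS AND PROOFS =====

-- the grams contributed by position x, in A's visit order
def pvPer (itemlist : List String) (x : Nat) : List String :=
  (if x + 2 < itemlist.length then [itemlist.getD x "" ++ " " ++ itemlist.getD (x+1) "" ++ " " ++ itemlist.getD (x+2) ""] else [])
  ++ (if x + 1 < itemlist.length then [itemlist.getD x "" ++ " " ++ itemlist.getD (x+1) ""] else [])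
  ++ [itemlist.getD x ""]

-- A's per-gram action on the (dict, next id) state
def pvAssign (st : PySem.Dict String Int × Int) (gram : String) : PySem.Dict String Int × Int :=
  if ¬ st.1.contains gram then (st.1.insert gram st.2, st.2 + 1) else st

-- one body of A's loop is the fold of pvAssign over pvPer
lemma pvStep_eq (itemlist : List String) (x : Nat) (d : PySem.Dict String Int) (n : Int)
    (hx : x < itemlist.length) :
    (GramParserLoop itemlist x d n) =
      GramParserLoop itemlist (x + 1)
        ((pvPer itemlist x).foldl pvAssign (d, n)).1
        ((pvPer itemlist x).foldl pvAssign (d, n)).2 := by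
  rw [GramParserLoop]
  simp only [hx, dif_pos, pvPer]
  split_ifs <;> simp_all [pvAssign]

lemma pvLoop_eq_foldl (itemlist : List String) (x : Nat) (d : PySem.Dict String Int) (n : Int) :
    GramParserLoop itemlist x d n =
      ((List.range' x (itemlist.length - x)).flatMap (pvPer itemlist)).foldl pvAssign (d, n) := by
  by_cases hx : x < itemlist.length
  · have hrange : List.range' x (itemlist.length - x) =
        x :: List.range' (x + 1) (itemlist.length - (x + 1)) := by
      have : itemlist.length - x = (itemlist.length - (x + 1)) + 1 := by omega
      rw [this, List.range'_succ]
    rw [pvStep_eq itemlist x d n hx,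
        pvLoop_eq_foldl itemlist (x + 1), hrange]
    simp [List.foldl_append]
  · have h1 : itemlist.length - x = 0 := by omega
    rw [GramParserLoop]
    simp [hx, h1]
termination_by itemlist.length - x

-- " ".join on one, two, three strings
lemma pvJoin1 (a : String) : PySem.Str.join " " [a] = a := by
  have h : (PySem.Str.join " " [a]).toList = a.toList := by
    simp [PySem.Str.join, PySem.Chars.join_singleton]
  exact String.toList_injective h

lemma pvJoin2 (a b : String) : PySem.Str.join " " [a, b] = a ++ " " ++ b := by
  have h : (PySem.Str.join " " [a, b]).toList = (a ++ " " ++ b).toList := by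
    simp [PySem.Str.join, PySem.Chars.join_cons_cons, PySem.Chars.join_singleton]
  exact String.toList_injective h

lemma pvJoin3 (a b c : String) : PySem.Str.join " " [a, b, c] = a ++ " " ++ b ++ " " ++ c := by
  have h : (PySem.Str.join " " [a, b, c]).toList = (a ++ " " ++ b ++ " " ++ c).toList := by
    simp [PySem.Str.join, PySem.Chars.join_cons_cons, PySem.Chars.join_singleton]
  exact String.toList_injective h

lemma pvTakeDrop (xs : List String) (x k : Nat) (h : x + k ≤ xs.length) :
    (xs.drop x).take k = (List.range k).map (fun i => xs.getD (x+i) "") := by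
  apply List.ext_getElem
  · simp; omega
  · intro i hi hj
    simp only [List.length_take, List.length_drop] at hi
    simp only [List.getElem_take, List.getElem_drop, List.getElem_map, List.getElem_range]
    rw [List.getD_eq_getElem _ _ (by omega)]

-- B's stage 1 produces exactly A's gram sequence
lemma pvPer_eq (itemlist : List String) (x : Nat) (hx : x < itemlist.length) :
    [3, 2, 1].flatMap (fun k : Nat =>
      if x + k ≤ itemlist.length then
        [PySem.Str.join " " (PySem.List.slice itemlist (some (x : Int)) (some ((x : Int) + (k : Int))))]
      else []) = pvPer itemlist x := by
  have hsl : ∀ k : Nat, x + k ≤ itemlist.length →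
      PySem.List.slice itemlist (some (x : Int)) (some ((x : Int) + (k : Int))) =
        (List.range k).map (fun i => itemlist.getD (x+i) "") := by
    intro k hk
    rw [PySem.List.slice_natCast_add, pvTakeDrop itemlist x k hk]
  simp only [List.flatMap_cons, List.flatMap_nil, List.append_nil]
  unfold pvPer
  by_cases h3 : x + 2 < itemlist.length
  · rw [if_pos (show x + 3 ≤ itemlist.length by omega),
        if_pos (show x + 2 ≤ itemlist.length by omega),
        if_pos (show x + 1 ≤ itemlist.length by omega),
        hsl 3 (by omega), hsl 2 (by omega), hsl 1 (by omega),
        if_pos h3, if_pos (show x + 1 < itemlist.length by omega)]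
    simp [List.range_succ, pvJoin1, pvJoin2, pvJoin3]
  · by_cases h2 : x + 1 < itemlist.length
    · rw [if_neg (show ¬ x + 3 ≤ itemlist.length by omega),
          if_pos (show x + 2 ≤ itemlist.length by omega),
          if_pos (show x + 1 ≤ itemlist.length by omega),
          hsl 2 (by omega), hsl 1 (by omega),
          if_neg h3, if_pos h2]
      simp [List.range_succ, pvJoin1, pvJoin2]
    · rw [if_neg (show ¬ x + 3 ≤ itemlist.length by omega),
          if_neg (show ¬ x + 2 ≤ itemlist.length by omega),
          if_pos (show x + 1 ≤ itemlist.length by omega),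
          hsl 1 (by omega),
          if_neg h3, if_neg h2]
      simp [List.range_succ, pvJoin1]

lemma pvGrams_eq (itemlist : List String) :
    GramParser_altGrams itemlist = (List.range itemlist.length).flatMap (pvPer itemlist) := by
  unfold GramParser_altGrams
  simp only [List.flatMap_def]
  rw [List.map_congr_left]
  intro x hx
  exact pvPer_eq itemlist x (List.mem_range.mp hx)

-- the novel grams of gs given the already-seen set
def pvNew (seen : PySem.Set String) : List String → List String
  | [] => []
  | g :: gs => if seen.contains g then pvNew seen gs else g :: pvNew (PySem.Set.add seen g) gs

-- B's selection fold appends exactly pvNew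
lemma pvSelect_eq (gs : List String) (seen : PySem.Set String) (nov : List String) :
    (gs.foldl GramParser_altSelect (seen, nov)).2 = nov ++ pvNew seen gs := by
  induction gs generalizing seen nov with
  | nil => simp [pvNew]
  | cons g gs ih =>
    by_cases hg : g ∈ seen
    · simp [GramParser_altSelect, hg, pvNew, ih]
    · simp [GramParser_altSelect, hg, pvNew, ih]

-- inserting g_0, g_1, … with ids n, n+1, …
def pvInsertSeq : PySem.Dict String Int → List String → Int → PySem.Dict String Int
  | d, [], _ => d
  | d, g :: gs, n => pvInsertSeq (d.insert g n) gs (n + 1)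

-- A's assignment fold, characterised through pvNew (seen mirrors the dict's key set)
lemma pvAssign_foldl (gs : List String) (d : PySem.Dict String Int) (n : Int)
    (seen : PySem.Set String) (hseen : ∀ k, d.contains k = seen.contains k) :
    gs.foldl pvAssign (d, n) =
      (pvInsertSeq d (pvNew seen gs) n, n + (pvNew seen gs).length) := by
  induction gs generalizing d n seen with
  | nil => simp [pvNew, pvInsertSeq]
  | cons g gs ih =>
    by_cases hg : seen.contains g
    · have hd : d.contains g := by rw [hseen]; exact hg
      rw [List.foldl_cons, show pvAssign (d, n) g = (d, n) by simp [pvAssign, hd],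
          pvNew, if_pos hg]
      exact ih d n seen hseen
    · have hd : ¬ d.contains g = true := by rw [hseen]; exact hg
      rw [List.foldl_cons, show pvAssign (d, n) g = (d.insert g n, n + 1) by simp [pvAssign, hd],
          pvNew, if_neg hg]
      have hseen' : ∀ k, ((d.insert g n).contains k) = (PySem.Set.add seen g).contains k := by
        intro k
        rw [PySem.Dict.contains_insert]
        have hadd : (PySem.Set.add seen g : List String) = seen ++ [g] := by
          simp [PySem.Set.add] at hg ⊢
          simp [hg]
        rw [hadd]
        by_cases hk : k = g
        · simp [hk]
        · simp [hk, hseen k]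
      rw [ih (d.insert g n) (n + 1) (PySem.Set.add seen g) hseen']
      have hlen : n + 1 + ((pvNew (PySem.Set.add seen g) gs).length : Int) =
          n + ((g :: pvNew (PySem.Set.add seen g) gs).length : Int) := by
        simp; omega
      rw [hlen]
      rfl

-- B's stage 3 fold is pvInsertSeq
lemma pvEnum_foldl (novel : List String) (d : PySem.Dict String Int) (n s : Int) :
    (PySem.List.enumerate novel s).foldl (fun d p => d.insert p.2 (n + p.1)) d =
      pvInsertSeq d novel (n + s) := by
  induction novel generalizing d s with
  | nil => rfl
  | cons g gs ih =>
    simp only [PySem.List.enumerate_cons, List.foldl_cons]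
    rw [ih (d.insert g (n + s)) (s + 1), show n + (s + 1) = (n + s) + 1 from by ring]
    rfl

-- the frozen key set of the starting dict tests like the dict itself
lemma pvSeen0 (d : PySem.Dict String Int) :
    ∀ k, d.contains k = (PySem.Set.ofList d.keys).contains k := by
  intro k
  apply Bool.eq_iff_iff.mpr
  simp [PySem.Set.mem_ofList, PySem.Dict.contains_iff_mem_keys]

-- ===== VERDICT (by name: the statement is the Claim_ definition above) =====
theorem GramParser_spec : Claim_equal_GramParser := by
  intro itemlist Hash Hashnumber _
  unfold Spec_GramParser GramParser GramParser_alt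
  dsimp only
  rw [pvLoop_eq_foldl]
  rw [show itemlist.length - 0 = itemlist.length from rfl, ← List.range_eq_range']
  rw [← pvGrams_eq]
  rw [pvAssign_foldl _ _ _ _ (pvSeen0 (PySem.Dict.mk Hash))]
  rw [pvSelect_eq, List.nil_append, pvEnum_foldl]
  norm_num
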